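-- pv_equiv track=rewrite | github.com/mbaljko/vault-grading-pipeline | 01_units/pipelines/pl1C_rubric_devt/python/generate-scoring-stats-for-manifest.py | derive_unique_template_labels
-- ===== SOURCE A (Python) =====
-- def derive_unique_template_labels(template_ids: list[str]) -> dict[str, str]:
-- 	tokenized_template_ids = {template_id: template_id.split("_") for template_id in template_ids}
-- 	preferred_labels: dict[str, str] = {}
-- 	preferred_counts: dict[str, int] = {}
-- 	for template_id, tokens in tokenized_template_ids.items():
-- 		if len(tokens) >= 2 and tokens[-2] in {"core", "adv"}:
-- 			preferred_label = f"{tokens[-2]}_{tokens[-1]}"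
-- 			preferred_labels[template_id] = preferred_label
-- 			preferred_counts[preferred_label] = preferred_counts.get(preferred_label, 0) + 1
--
-- 	labels_by_template: dict[str, str] = {}
-- 	for template_id, preferred_label in preferred_labels.items():
-- 		if preferred_counts[preferred_label] == 1:
-- 			labels_by_template[template_id] = preferred_label
--
-- 	for width in range(1, max((len(tokens) for tokens in tokenized_template_ids.values()), default=0) + 1):
-- 		candidate_labels: dict[str, str] = {}
-- 		candidate_counts: dict[str, int] = {}
-- 		for template_id, tokens in tokenized_template_ids.items():
-- 			if template_id in labels_by_template:
-- 				continue
-- 			candidate_label = "_".join(tokens[-width:])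
-- 			candidate_labels[template_id] = candidate_label
-- 			candidate_counts[candidate_label] = candidate_counts.get(candidate_label, 0) + 1
-- 		for template_id, candidate_label in candidate_labels.items():
-- 			if candidate_counts[candidate_label] == 1:
-- 				labels_by_template[template_id] = candidate_label
-- 	for template_id in template_ids:
-- 		labels_by_template.setdefault(template_id, template_id)
-- 	return labels_by_template
-- ===== SOURCE B (Python) =====
-- def derive_unique_template_labels(template_ids: list[str]) -> dict[str, str]:
--     # Deduplicate preserving first occurrence, and tokenize once.
--     order = list(dict.fromkeys(template_ids))
--     toks = {tid: tid.split("_") for tid in order}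
--     labels: dict[str, str] = {}
--
--     # Preferred "core_x"/"adv_x" labels, kept only when unique.
--     pref = []
--     pref_counts: dict[str, int] = {}
--     for tid in order:
--         t = toks[tid]
--         if len(t) >= 2 and t[-2] in ("core", "adv"):
--             lab = t[-2] + "_" + t[-1]
--             pref.append((tid, lab))
--             pref_counts[lab] = pref_counts.get(lab, 0) + 1
--     for tid, lab in pref:
--         if pref_counts[lab] == 1:
--             labels[tid] = lab
--
--     # Widen suffixes one token per round, extending the previous suffix
--     # incrementally instead of re-joining the last `width` tokens each time.
--     suffix = {tid: "" for tid in order}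
--     max_width = max((len(t) for t in toks.values()), default=0)
--     for width in range(1, max_width + 1):
--         unlabeled = [tid for tid in order if tid not in labels]
--         counts: dict[str, int] = {}
--         for tid in unlabeled:
--             t = toks[tid]
--             if width <= len(t):
--                 suffix[tid] = t[len(t) - width] + ("_" + suffix[tid] if width > 1 else "")
--             counts[suffix[tid]] = counts.get(suffix[tid], 0) + 1
--         for tid in unlabeled:
--             s = suffix[tid]
--             if counts[s] == 1:
--                 labels[tid] = s
--
--     for tid in template_ids:
--         labels.setdefault(tid, tid)
--     return labels
-- ===== Notes on version B (the rewrite author's own statement) =====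
-- stated objective: alternative
-- what changed: B deduplicates the ids once up front and, in the width rounds, builds each candidate suffix incrementally by prepending one token to the previous round's stored suffix and only walks the still-unlabeled ids, instead of re-joining the last `width` tokens from scratch for every id in every round; intended to reduce re-joining work, measured ~1.3x at the largest timed size (below the 1.5x bar, so not claimed as faster).
import Mathlib
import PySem

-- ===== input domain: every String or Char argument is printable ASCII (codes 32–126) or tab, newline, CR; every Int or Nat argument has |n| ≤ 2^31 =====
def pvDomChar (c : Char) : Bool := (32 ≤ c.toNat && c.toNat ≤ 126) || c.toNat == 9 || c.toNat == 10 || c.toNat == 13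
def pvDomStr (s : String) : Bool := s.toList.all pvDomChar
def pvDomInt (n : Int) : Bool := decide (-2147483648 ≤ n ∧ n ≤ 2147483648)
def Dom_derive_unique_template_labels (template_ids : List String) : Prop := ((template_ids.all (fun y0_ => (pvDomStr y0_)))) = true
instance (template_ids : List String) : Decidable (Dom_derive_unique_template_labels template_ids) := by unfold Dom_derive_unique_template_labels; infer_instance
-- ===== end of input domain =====

-- B re-implements the width rounds over deduplicated ids with incrementally extended
-- suffix strings (reusing the previous round's suffix) instead of re-joining the last
-- `width` tokens from scratch each round; objective: alternative (intended to cut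
-- per-round re-joining work; a timing run measured only ~1.3x at the largest size).

-- ===== PORT A =====
-- A-side helpers (one named function per Python loop body; literal transliteration)
def pvA_tokenize (template_ids : List String) : PySem.Dict String (List String) :=
  template_ids.foldl (fun d tid => d.insert tid ((PySem.Str.split? tid "_").getD [])) PySem.Dict.empty

def pvA_prefStep (st : PySem.Dict String String × PySem.Dict String Int)
    (p : String × List String) : PySem.Dict String String × PySem.Dict String Int :=
  if 2 ≤ p.2.length ∧ (PySem.List.pyGetD p.2 (-2) "" = "core" ∨ PySem.List.pyGetD p.2 (-2) "" = "adv") then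
    let lab := PySem.List.pyGetD p.2 (-2) "" ++ "_" ++ PySem.List.pyGetD p.2 (-1) ""
    (st.1.insert p.1 lab, st.2.insert lab (st.2.getD lab 0 + 1))
  else st

-- the `if counts[label] == 1: labels[tid] = label` loop (used for both such loops in A)
def pvA_pick (counts : PySem.Dict String Int) (pairs : List (String × String))
    (L : PySem.Dict String String) : PySem.Dict String String :=
  pairs.foldl (fun L2 p => if counts.getD p.2 0 = 1 then L2.insert p.1 p.2 else L2) L

def pvA_candStep (L : PySem.Dict String String) (width : Int)
    (c : PySem.Dict String String × PySem.Dict String Int) (p : String × List String) :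
    PySem.Dict String String × PySem.Dict String Int :=
  if L.contains p.1 then c
  else
    let cand := PySem.Str.join "_" (PySem.List.slice p.2 (some (-width)) none)
    (c.1.insert p.1 cand, c.2.insert cand (c.2.getD cand 0 + 1))

def pvA_round (tokenized : PySem.Dict String (List String))
    (L : PySem.Dict String String) (width : Int) : PySem.Dict String String :=
  let cstate := tokenized.items.foldl (pvA_candStep L width) (PySem.Dict.empty, PySem.Dict.empty)
  pvA_pick cstate.2 cstate.1.items L

def derive_unique_template_labels (template_ids : List String) : List (String × String) :=
  let tokenized := pvA_tokenize template_ids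
  let pstate := tokenized.items.foldl pvA_prefStep (PySem.Dict.empty, PySem.Dict.empty)
  let labels0 := pvA_pick pstate.2 pstate.1.items PySem.Dict.empty
  let maxw : Nat := PySem.List.maxD (tokenized.values.map List.length) (fun n => n) 0
  let labels1 := (PySem.List.pyRange 1 ((maxw : Int) + 1) 1).foldl (pvA_round tokenized) labels0
  (template_ids.foldl (fun L tid => L.setdefault tid tid) labels1).items

-- ===== PORT B =====
-- B-side helpers (one named function per loop of Source B)
def pvB_toks (order : List String) : PySem.Dict String (List String) :=
  order.foldl (fun d tid => d.insert tid ((PySem.Str.split? tid "_").getD [])) PySem.Dict.empty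

def pvB_prefStep (toks : PySem.Dict String (List String))
    (st : List (String × String) × PySem.Dict String Int) (tid : String) :
    List (String × String) × PySem.Dict String Int :=
  let t := toks.getD tid []
  if 2 ≤ t.length ∧ (PySem.List.pyGetD t (-2) "" = "core" ∨ PySem.List.pyGetD t (-2) "" = "adv") then
    let lab := PySem.List.pyGetD t (-2) "" ++ "_" ++ PySem.List.pyGetD t (-1) ""
    (st.1 ++ [(tid, lab)], st.2.insert lab (st.2.getD lab 0 + 1))
  else st

def pvB_candStep (toks : PySem.Dict String (List String)) (width : Int)
    (c : PySem.Dict String String × PySem.Dict String Int) (tid : String) :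
    PySem.Dict String String × PySem.Dict String Int :=
  let t := toks.getD tid []
  let suf :=
    if width ≤ (t.length : Int) then
      PySem.List.pyGetD t ((t.length : Int) - width) ""
        ++ (if 1 < width then "_" ++ c.1.getD tid "" else "")
    else c.1.getD tid ""
  (c.1.insert tid suf, c.2.insert suf (c.2.getD suf 0 + 1))

def pvB_round (order : List String) (toks : PySem.Dict String (List String))
    (st : PySem.Dict String String × PySem.Dict String String) (width : Int) :
    PySem.Dict String String × PySem.Dict String String :=
  let unlabeled := order.filter (fun tid => !(st.1.contains tid))
  let cstate := unlabeled.foldl (pvB_candStep toks width) (st.2, PySem.Dict.empty)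
  let labels2 := unlabeled.foldl
    (fun L tid =>
      let s := cstate.1.getD tid ""
      if cstate.2.getD s 0 = 1 then L.insert tid s else L) st.1
  (labels2, cstate.1)

def derive_unique_template_labels_alt (template_ids : List String) : List (String × String) :=
  let order := PySem.List.dedup template_ids
  let toks := pvB_toks order
  let pstate := order.foldl (pvB_prefStep toks) ([], PySem.Dict.empty)
  let labels0 := pstate.1.foldl
    (fun L p => if pstate.2.getD p.2 0 = 1 then L.insert p.1 p.2 else L) PySem.Dict.empty
  let suffix0 := order.foldl (fun d tid => d.insert tid "") PySem.Dict.empty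
  let maxw : Nat := PySem.List.maxD (toks.values.map List.length) (fun n => n) 0
  let final := (PySem.List.pyRange 1 ((maxw : Int) + 1) 1).foldl (pvB_round order toks) (labels0, suffix0)
  (template_ids.foldl (fun L tid => L.setdefault tid tid) final.1).items

-- ===== PRECONDITION & SPEC =====
def Spec_derive_unique_template_labels (template_ids : List String) (out : List (String × String)) : Prop := out = derive_unique_template_labels_alt template_ids
instance (template_ids : List String) (out : List (String × String)) : Decidable (Spec_derive_unique_template_labels template_ids out) := by unfold Spec_derive_unique_template_labels; infer_instance

-- ===== CLAIM (what is proved, stated in full; the proofs are below) =====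
def Claim_equal_derive_unique_template_labels : Prop := ∀ (template_ids : List String), Dom_derive_unique_template_labels template_ids → Spec_derive_unique_template_labels template_ids (derive_unique_template_labels template_ids)



-- the token list of an id, and the joined suffix of the last `w` tokens
def pvTok (tid : String) : List String := (PySem.Str.split? tid "_").getD []

def pvSfx (t : List String) (w : Nat) : String :=
  PySem.Str.join "_" (t.drop (t.length - w))

def pvBump (c : PySem.Dict String Int) (x : String) : PySem.Dict String Int :=
  c.insert x (c.getD x 0 + 1)

-- the common mathematical content of one width round
def pvRound (order : List String) (L : PySem.Dict String String) (w : Nat) :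
    PySem.Dict String String :=
  let unl := order.filter (fun tid => !(L.contains tid))
  let counts := unl.foldl (fun c tid => pvBump c (pvSfx (pvTok tid) w)) PySem.Dict.empty
  unl.foldl
    (fun L2 tid => if counts.getD (pvSfx (pvTok tid) w) 0 = 1 then L2.insert tid (pvSfx (pvTok tid) w) else L2) L


theorem foldl_insert_keyed_items {ν : Type} (val : String → ν) :
    ∀ (xs : List String) (d : PySem.Dict String ν) (s : List String),
      d.items = s.map (fun k => (k, val k)) → s.Nodup →
      (xs.foldl (fun d tid => d.insert tid (val tid)) d).items
        = (PySem.Set.update s xs).map (fun k => (k, val k)) := by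
  intro xs
  induction xs with
  | nil => intro d s h hn; simpa [PySem.Set.update] using h
  | cons x xs ih =>
    intro d s h hn
    have hkeys : d.keys = s := by
      simp only [PySem.Dict.keys, h, List.map_map]
      simp [Function.comp_def]
    rw [List.foldl_cons, PySem.Set.update_cons]
    by_cases hx : x ∈ s
    · have hc : d.contains x = true := by
        rw [PySem.Dict.contains_eq_decide_mem_keys, hkeys]; simpa
      have hadd : PySem.Set.add s x = s := by
        simp [PySem.Set.add, PySem.Set.contains, hx]
      have hit : (d.insert x (val x)).items = d.items := by
        rw [PySem.Dict.items_insert_of_contains _ _ hc, h]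
        rw [List.map_map]
        apply List.map_congr_left
        intro k hk
        simp only [Function.comp]
        by_cases hkx : k = x <;> simp [hkx]
      rw [hadd]
      exact ih _ s (by rw [hit, h]) hn
    · have hc : d.contains x = false := by
        rw [PySem.Dict.contains_eq_decide_mem_keys, hkeys]; simpa
      have hadd : PySem.Set.add s x = s ++ [x] := by
        simp [PySem.Set.add, PySem.Set.contains, hx]
      have hit : (d.insert x (val x)).items = (s ++ [x]).map (fun k => (k, val k)) := by
        rw [PySem.Dict.items_insert_of_not_contains _ _ hc, h]; simp
      rw [hadd]
      exact ih _ (s ++ [x]) hit (by simp [List.nodup_append, hn]; exact fun a ha he => hx (he ▸ ha))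

theorem tokenize_items (xs : List String) :
    (pvA_tokenize xs).items = (PySem.List.dedup xs).map (fun k => (k, pvTok k)) := by
  have h := foldl_insert_keyed_items (fun tid => (PySem.Str.split? tid "_").getD [])
    xs PySem.Dict.empty [] rfl (by simp)
  simpa [pvA_tokenize, pvTok, PySem.Set.update_nil_left] using h

theorem dedup_idem (ids : List String) :
    PySem.List.dedup (PySem.List.dedup ids) = PySem.List.dedup ids := by
  simp only [PySem.List.dedup_eq_ofList]
  exact PySem.Set.ofList_eq_self_of_nodup _ (by simpa [← PySem.List.dedup_eq_ofList] using PySem.List.nodup_dedup ids)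

theorem toks_eq (ids : List String) : pvB_toks (PySem.List.dedup ids) = pvA_tokenize ids := by
  have hbe : pvB_toks = pvA_tokenize := rfl
  apply PySem.Dict.ext
  rw [hbe, tokenize_items, tokenize_items, dedup_idem]

theorem tokenize_keys (xs : List String) : (pvA_tokenize xs).keys = PySem.List.dedup xs := by
  simp only [PySem.Dict.keys, tokenize_items, List.map_map]
  simp [Function.comp_def]

theorem toks_getD (ids : List String) (tid : String) (h : tid ∈ PySem.List.dedup ids) :
    (pvA_tokenize ids).getD tid [] = pvTok tid := by
  apply PySem.Dict.getD_of_mem_items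
  · rw [tokenize_items]; exact List.mem_map.mpr ⟨tid, h, rfl⟩
  · rw [tokenize_keys]; exact PySem.List.nodup_dedup ids
theorem str_join_nil : PySem.Str.join "_" [] = "" := by
  apply String.toList_inj.mp
  simp [PySem.Str.toList_join, PySem.Chars.join_nil]

theorem str_join_singleton (a : String) : PySem.Str.join "_" [a] = a := by
  apply String.toList_inj.mp
  simp [PySem.Str.toList_join, PySem.Chars.join_singleton]

theorem str_join_cons (a : String) (l : List String) (h : l ≠ []) :
    PySem.Str.join "_" (a :: l) = a ++ "_" ++ PySem.Str.join "_" l := by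
  apply String.toList_inj.mp
  cases l with
  | nil => exact absurd rfl h
  | cons b rest =>
    simp [PySem.Str.toList_join, PySem.Chars.join_cons_cons]

theorem cand_eq (t : List String) (w : Nat) (hw : 1 ≤ w) :
    PySem.Str.join "_" (PySem.List.slice t (some (-(w : Int))) none) = pvSfx t w := by
  rw [PySem.List.slice_from_neg_natCast t w hw, pvSfx]

theorem sfx_step (t : List String) (w : Nat) (hw : 1 ≤ w) :
    (if (w : Int) ≤ (t.length : Int) then
        PySem.List.pyGetD t ((t.length : Int) - (w : Int)) ""
          ++ (if 1 < (w : Int) then "_" ++ pvSfx t (w - 1) else "")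
      else pvSfx t (w - 1)) = pvSfx t w := by
  by_cases hle : w ≤ t.length
  · rw [if_pos (by exact_mod_cast hle)]
    have hidx : t.length - w < t.length := by omega
    have hget : PySem.List.pyGetD t ((t.length : Int) - (w : Int)) "" = t[t.length - w] := by
      have : ((t.length : Int) - (w : Int)) = ((t.length - w : Nat) : Int) := by omega
      rw [this, PySem.List.pyGetD_natCast]
      exact List.getD_eq_getElem t "" hidx
    have hdrop : t.drop (t.length - w) = t[t.length - w] :: t.drop (t.length - w + 1) := by
      exact List.drop_eq_getElem_cons hidx
    by_cases h1 : w = 1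
    · subst h1
      rw [if_neg (by norm_num)]
      rw [pvSfx, hdrop]
      have : t.length - 1 + 1 = t.length := by omega
      rw [this, List.drop_length, str_join_singleton, hget, String.append_empty]
    · have h1w : 1 < w := by omega
      rw [if_pos (by exact_mod_cast h1w)]
      have hlen1 : t.length - (w - 1) = t.length - w + 1 := by omega
      have hne : t.drop (t.length - w + 1) ≠ [] := by
        intro hnil
        have := List.length_drop (l := t) (i := t.length - w + 1)
        rw [hnil] at this
        simp at this; omega
      simp only [pvSfx]
      rw [hlen1, hdrop, str_join_cons _ _ hne, hget, String.append_assoc]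
  · rw [if_neg (by exact_mod_cast hle)]
    have h1 : t.length - (w - 1) = 0 := by omega
    have h2 : t.length - w = 0 := by omega
    rw [pvSfx, pvSfx, h1, h2]
theorem pref_eq (toks : PySem.Dict String (List String)) :
    ∀ (l : List String), (∀ tid ∈ l, toks.getD tid [] = pvTok tid) → l.Nodup →
    ∀ (dA : PySem.Dict String String) (lB : List (String × String)) (c : PySem.Dict String Int),
      (∀ k ∈ l, dA.contains k = false) → dA.items = lB →
      ((l.map (fun k => (k, pvTok k))).foldl pvA_prefStep (dA, c)).1.items
          = (l.foldl (pvB_prefStep toks) (lB, c)).1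
        ∧ ((l.map (fun k => (k, pvTok k))).foldl pvA_prefStep (dA, c)).2
          = (l.foldl (pvB_prefStep toks) (lB, c)).2 := by
  intro l
  induction l with
  | nil => intro _ _ dA lB c _ hitems; exact ⟨by simpa using hitems, rfl⟩
  | cons x rest ih =>
    intro htoks hnd dA lB c hfresh hitems
    have hx : toks.getD x [] = pvTok x := htoks x (by simp)
    have hcx : dA.contains x = false := hfresh x (by simp)
    simp only [List.map_cons, List.foldl_cons]
    rw [pvA_prefStep, pvB_prefStep]
    simp only [hx]
    by_cases hcond : 2 ≤ (pvTok x).length ∧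
        (PySem.List.pyGetD (pvTok x) (-2) "" = "core" ∨ PySem.List.pyGetD (pvTok x) (-2) "" = "adv")
    · rw [if_pos hcond, if_pos hcond]
      apply ih (fun tid ht => htoks tid (by simp [ht])) (List.Nodup.of_cons hnd)
      · intro k hk
        rw [PySem.Dict.contains_insert]
        have hkx : k ≠ x := by rintro rfl; exact (List.nodup_cons.mp hnd).1 hk
        simp [hkx, hfresh k (by simp [hk])]
      · rw [PySem.Dict.items_insert_of_not_contains _ _ hcx, hitems]
    · rw [if_neg hcond, if_neg hcond]
      exact ih (fun tid ht => htoks tid (by simp [ht])) (List.Nodup.of_cons hnd) dA lB c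
        (fun k hk => hfresh k (by simp [hk])) hitems
theorem foldl_skip {α β : Type} (l : List α) (p : α → Bool) (g : β → α → β) (init : β) :
    l.foldl (fun acc x => if p x then acc else g acc x) init
      = (l.filter (fun x => !p x)).foldl g init := by
  induction l generalizing init with
  | nil => rfl
  | cons x rest ih =>
    by_cases hx : p x <;> simp [hx, ih]

theorem roundA_eq (tokenized : PySem.Dict String (List String)) (order : List String)
    (hitems : tokenized.items = order.map (fun k => (k, pvTok k))) (ho : order.Nodup)
    (L : PySem.Dict String String) (width : Int) (hw : 1 ≤ width) :
    pvA_round tokenized L width = pvRound order L width.toNat := by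
  have hwn : 1 ≤ width.toNat := by omega
  have hwi : width = (width.toNat : Int) := by omega
  rw [pvA_round, hitems, List.foldl_map]
  simp only [pvA_candStep]
  rw [foldl_skip]
  rw [hwi]
  simp only [cand_eq _ width.toNat hwn]
  have hsplit := PySem.List.foldl_prod_mk
      (fun (d : PySem.Dict String String) (y : String) => d.insert y (pvSfx (pvTok y) width.toNat))
      (fun (c : PySem.Dict String Int) (y : String) =>
        c.insert (pvSfx (pvTok y) width.toNat) (c.getD (pvSfx (pvTok y) width.toNat) 0 + 1))
      (order.filter (fun x => !L.contains x)) PySem.Dict.empty PySem.Dict.empty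
  rw [hsplit]
  have hnodup : (order.filter (fun tid => !(L.contains tid))).Nodup := List.Nodup.filter _ ho
  rw [pvA_pick,
    PySem.Dict.items_foldl_insert_fresh _ (fun a => a) (fun a => pvSfx (pvTok a) width.toNat)
      PySem.Dict.empty (fun a _ => rfl) (by simpa using hnodup)]
  have hemp : (PySem.Dict.empty : PySem.Dict String String).items = [] := rfl
  rw [hemp, List.nil_append, List.foldl_map]
  rw [pvRound]
  simp only [pvBump]
  rfl
theorem bcand (toks : PySem.Dict String (List String)) (width : Int) (hw : 1 ≤ width) :
    ∀ (l : List String), (∀ tid ∈ l, toks.getD tid [] = pvTok tid) → l.Nodup →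
    ∀ (sfxd : PySem.Dict String String) (c : PySem.Dict String Int),
      (∀ tid ∈ l, sfxd.getD tid "" = pvSfx (pvTok tid) (width.toNat - 1)) →
      (l.foldl (pvB_candStep toks width) (sfxd, c)).2
          = l.foldl (fun c tid => pvBump c (pvSfx (pvTok tid) width.toNat)) c
        ∧ ∀ tid, (l.foldl (pvB_candStep toks width) (sfxd, c)).1.getD tid ""
            = if tid ∈ l then pvSfx (pvTok tid) width.toNat else sfxd.getD tid "" := by
  intro l
  induction l with
  | nil => intro _ _ sfxd c _; exact ⟨rfl, fun tid => by simp⟩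
  | cons x rest ih =>
    intro htoks hnd sfxd c hs
    have hwn : 1 ≤ width.toNat := by omega
    have hwi : width = (width.toNat : Int) := by omega
    have hx : toks.getD x [] = pvTok x := htoks x (by simp)
    have hstep : pvB_candStep toks width (sfxd, c) x
        = (sfxd.insert x (pvSfx (pvTok x) width.toNat),
           pvBump c (pvSfx (pvTok x) width.toNat)) := by
      rw [pvB_candStep]
      simp only [hx]
      have hsufx : (if width ≤ ((pvTok x).length : Int) then
          PySem.List.pyGetD (pvTok x) (((pvTok x).length : Int) - width) ""
            ++ (if 1 < width then "_" ++ sfxd.getD x "" else "")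
        else sfxd.getD x "") = pvSfx (pvTok x) width.toNat := by
        rw [hs x (by simp), hwi]
        exact sfx_step (pvTok x) width.toNat hwn
      rw [hsufx, pvBump]
    rw [List.foldl_cons, hstep]
    have hrest := ih (fun tid ht => htoks tid (by simp [ht])) (List.Nodup.of_cons hnd)
      (sfxd.insert x (pvSfx (pvTok x) width.toNat)) (pvBump c (pvSfx (pvTok x) width.toNat))
      (fun tid ht => by
        have hne : tid ≠ x := by rintro rfl; exact (List.nodup_cons.mp hnd).1 ht
        rw [PySem.Dict.getD_insert_of_ne _ _ _ hne, hs tid (by simp [ht])])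
    refine ⟨by rw [hrest.1, List.foldl_cons], fun tid => ?_⟩
    rw [hrest.2 tid]
    by_cases hmem : tid ∈ rest
    · simp [hmem]
    · by_cases heq : tid = x
      · subst heq
        simp [hmem, PySem.Dict.getD_insert_self]
      · simp [hmem, heq, PySem.Dict.getD_insert_of_ne _ _ _ heq]

theorem contains_foldl_insert_if (l : List String) (P : String → Prop) [DecidablePred P]
    (v : String → String) (L : PySem.Dict String String) (x : String)
    (h : L.contains x = true) :
    (l.foldl (fun L2 tid => if P tid then L2.insert tid (v tid) else L2) L).contains x = true := by
  induction l generalizing L with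
  | nil => exact h
  | cons y rest ih =>
    rw [List.foldl_cons]
    by_cases hy : P y
    · rw [if_pos hy]
      exact ih _ (by rw [PySem.Dict.contains_insert, h, Bool.or_true])
    · rw [if_neg hy]; exact ih _ h
theorem roundB_eq (order : List String) (ho : order.Nodup)
    (toks : PySem.Dict String (List String))
    (htoks : ∀ tid ∈ order, toks.getD tid [] = pvTok tid)
    (L suffix : PySem.Dict String String) (width : Int) (hw : 1 ≤ width)
    (hsuf : ∀ tid ∈ order, L.contains tid = false →
      suffix.getD tid "" = pvSfx (pvTok tid) (width.toNat - 1)) :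
    (pvB_round order toks (L, suffix) width).1 = pvRound order L width.toNat
      ∧ ∀ tid ∈ order, (pvB_round order toks (L, suffix) width).1.contains tid = false →
          (pvB_round order toks (L, suffix) width).2.getD tid "" = pvSfx (pvTok tid) width.toNat := by
  have hmemunl : ∀ tid ∈ order.filter (fun tid => !(L.contains tid)),
      tid ∈ order ∧ L.contains tid = false := by
    intro tid ht
    rw [List.mem_filter] at ht
    exact ⟨ht.1, by simpa using ht.2⟩
  have hcand := bcand toks width hw (order.filter (fun tid => !(L.contains tid)))
    (fun tid ht => htoks tid (hmemunl tid ht).1)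
    (List.Nodup.filter _ ho) suffix PySem.Dict.empty
    (fun tid ht => hsuf tid (hmemunl tid ht).1 (hmemunl tid ht).2)
  simp only [pvB_round]
  constructor
  · rw [pvRound]
    apply PySem.List.foldl_congr_mem
    intro acc tid ht
    rw [hcand.2 tid, if_pos ht, hcand.1]
  · intro tid htid hcont
    have hLtid : L.contains tid = false := by
      by_contra hne
      have htrue : L.contains tid = true := by
        cases h' : L.contains tid
        · exact absurd h' hne
        · rfl
      rw [contains_foldl_insert_if _ _ _ _ _ htrue] at hcont
      exact absurd hcont (by simp)
    have hmem : tid ∈ order.filter (fun tid => !(L.contains tid)) := by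
      rw [List.mem_filter, hLtid]; exact ⟨htid, rfl⟩
    rw [hcand.2 tid, if_pos hmem]
theorem rounds_eq (order : List String) (ho : order.Nodup)
    (tokenized toks : PySem.Dict String (List String))
    (hitems : tokenized.items = order.map (fun k => (k, pvTok k)))
    (htoks : ∀ tid ∈ order, toks.getD tid [] = pvTok tid) :
    ∀ (n w0 : Nat), 1 ≤ w0 → ∀ (L suffix : PySem.Dict String String),
      (∀ tid ∈ order, L.contains tid = false → suffix.getD tid "" = pvSfx (pvTok tid) (w0 - 1)) →
      (PySem.List.pyRange (w0 : Int) ((w0 : Int) + (n : Int)) 1).foldl (pvA_round tokenized) L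
        = ((PySem.List.pyRange (w0 : Int) ((w0 : Int) + (n : Int)) 1).foldl (pvB_round order toks) (L, suffix)).1 := by
  intro n
  induction n with
  | zero =>
    intro w0 hw L suffix hinv
    rw [PySem.List.pyRange_one_eq_nil (by omega)]
    rfl
  | succ n ih =>
    intro w0 hw L suffix hinv
    have hcons : PySem.List.pyRange (w0 : Int) ((w0 : Int) + ((n + 1 : Nat) : Int)) 1
        = (w0 : Int) :: PySem.List.pyRange ((w0 : Int) + 1) ((w0 : Int) + ((n + 1 : Nat) : Int)) 1 :=
      PySem.List.pyRange_one_cons (by push_cast; omega)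
    rw [hcons, List.foldl_cons, List.foldl_cons]
    have hw1 : (1 : Int) ≤ (w0 : Int) := by exact_mod_cast hw
    have htn : ((w0 : Int)).toNat = w0 := Int.toNat_natCast w0
    have hra := roundA_eq tokenized order hitems ho L (w0 : Int) hw1
    rw [htn] at hra
    have hrb := roundB_eq order ho toks htoks L suffix (w0 : Int) hw1
      (by rw [htn]; exact hinv)
    rw [htn] at hrb
    have hp1 : (pvB_round order toks (L, suffix) (w0 : Int)).1 = pvRound order L w0 := hrb.1
    have hpair : pvB_round order toks (L, suffix) (w0 : Int)
        = (pvRound order L w0, (pvB_round order toks (L, suffix) (w0 : Int)).2) := by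
      rw [← hp1]
    rw [hra, hpair]
    have hinv' : ∀ tid ∈ order, (pvRound order L w0).contains tid = false →
        (pvB_round order toks (L, suffix) (w0 : Int)).2.getD tid "" = pvSfx (pvTok tid) ((w0 + 1) - 1) := by
      intro tid htid hc
      simpa using hrb.2 tid htid (by rw [hp1]; exact hc)
    have hIH := ih (w0 + 1) (by omega) (pvRound order L w0)
      (pvB_round order toks (L, suffix) (w0 : Int)).2 hinv'
    have he1 : ((w0 + 1 : Nat) : Int) = (w0 : Int) + 1 := by push_cast; ring
    have he2 : (w0 : Int) + 1 + (n : Int) = (w0 : Int) + ((n + 1 : Nat) : Int) := by push_cast; ring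
    rw [he1, he2] at hIH
    exact hIH
theorem pvSfx_zero (t : List String) : pvSfx t 0 = "" := by
  rw [pvSfx]
  simp only [Nat.sub_zero, List.drop_length]
  exact str_join_nil

theorem suffix0_items (ids : List String) :
    ((PySem.List.dedup ids).foldl (fun d tid => d.insert tid "") PySem.Dict.empty).items
      = (PySem.List.dedup ids).map (fun k => (k, "")) := by
  have h := foldl_insert_keyed_items (fun _ => "") (PySem.List.dedup ids) PySem.Dict.empty [] rfl (by simp)
  rw [h, PySem.Set.update_nil_left, PySem.Set.ofList_eq_self_of_nodup _ (PySem.List.nodup_dedup ids)]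

theorem suffix0_getD (ids : List String) (tid : String) (h : tid ∈ PySem.List.dedup ids) :
    ((PySem.List.dedup ids).foldl (fun d tid => d.insert tid "") PySem.Dict.empty).getD tid "" = "" := by
  apply PySem.Dict.getD_of_mem_items
  · rw [suffix0_items]; exact List.mem_map.mpr ⟨tid, h, rfl⟩
  · simp only [PySem.Dict.keys, suffix0_items, List.map_map]
    simp only [Function.comp_def, List.map_id']
    exact PySem.List.nodup_dedup ids

theorem rounds_eq' (order : List String) (ho : order.Nodup)
    (tokenized toks : PySem.Dict String (List String))
    (hitems : tokenized.items = order.map (fun k => (k, pvTok k)))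
    (htoks : ∀ tid ∈ order, toks.getD tid [] = pvTok tid)
    (M : Nat) (L suffix : PySem.Dict String String)
    (hinv : ∀ tid ∈ order, L.contains tid = false → suffix.getD tid "" = pvSfx (pvTok tid) 0) :
    (PySem.List.pyRange 1 ((M : Int) + 1) 1).foldl (pvA_round tokenized) L
      = ((PySem.List.pyRange 1 ((M : Int) + 1) 1).foldl (pvB_round order toks) (L, suffix)).1 := by
  have h := rounds_eq order ho tokenized toks hitems htoks M 1 (le_refl 1) L suffix
    (by simpa using hinv)
  have h1 : ((1 : Nat) : Int) = (1 : Int) := by norm_num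
  rw [h1] at h
  have h2 : (1 : Int) + (M : Int) = (M : Int) + 1 := by ring
  rw [h2] at h
  exact h

theorem derive_unique_template_labels_spec' : ∀ (ids : List String),
    derive_unique_template_labels ids = derive_unique_template_labels_alt ids := by
  intro ids
  simp only [derive_unique_template_labels, derive_unique_template_labels_alt]
  rw [toks_eq ids, pvA_pick, tokenize_items ids]
  have hpref := pref_eq (pvA_tokenize ids) (PySem.List.dedup ids)
    (fun tid h => toks_getD ids tid h) (PySem.List.nodup_dedup ids)
    PySem.Dict.empty [] PySem.Dict.empty (fun k _ => rfl) rfl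
  rw [hpref.1, hpref.2]
  rw [rounds_eq' (PySem.List.dedup ids) (PySem.List.nodup_dedup ids) (pvA_tokenize ids) (pvA_tokenize ids)
    (tokenize_items ids) (fun tid h => toks_getD ids tid h)
    (PySem.List.maxD ((pvA_tokenize ids).values.map List.length) (fun n => n) 0) _ _
    (fun tid h _ => by rw [suffix0_getD ids tid h, pvSfx_zero])]

-- ===== VERDICT (by name: the statement is the Claim_ definition above) =====
theorem derive_unique_template_labels_spec : Claim_equal_derive_unique_template_labels := by
  intro template_ids _
  exact derive_unique_template_labels_spec' template_ids
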